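-- pv_equiv track=rewrite | github.com/tanglrHello/nlpnju | scripts/preprocessing/gold_aligned.py | check_index_continuous
-- ===== SOURCE A (Python) =====
-- def check_index_continuous(word_indexes):
--     is_continuous = False
--     last_index = word_indexes[0]
--     for i in word_indexes[1:]:
--         if i != last_index + 1:
--             break
--         else:
--             last_index = i
--     else:
--         is_continuous = True
--     return is_continuous
-- ===== SOURCE B (Python) =====
-- def check_index_continuous(word_indexes):
--     return word_indexes == list(range(word_indexes[0], word_indexes[0] + len(word_indexes)))
-- ===== Notes on version B (the rewrite author's own statement) =====
-- stated objective: simpler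
-- what changed: The element-by-element scan with early break and for-else flag is replaced by building the expected consecutive range once and comparing the input list to it for equality.
import Mathlib
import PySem

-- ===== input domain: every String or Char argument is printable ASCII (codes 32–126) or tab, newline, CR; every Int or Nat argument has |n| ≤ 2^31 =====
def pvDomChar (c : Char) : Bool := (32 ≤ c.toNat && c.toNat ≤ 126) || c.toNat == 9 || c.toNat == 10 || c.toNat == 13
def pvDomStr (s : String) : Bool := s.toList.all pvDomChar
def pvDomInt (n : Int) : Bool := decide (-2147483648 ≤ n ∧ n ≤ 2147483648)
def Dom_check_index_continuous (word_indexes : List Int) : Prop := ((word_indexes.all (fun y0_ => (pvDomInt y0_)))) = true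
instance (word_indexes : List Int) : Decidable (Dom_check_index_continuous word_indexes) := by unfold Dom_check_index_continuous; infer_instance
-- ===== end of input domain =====

-- B replaces A's scan-with-early-break by building the expected consecutive range and one equality test (objective: simpler).


-- ===== PORT A =====
-- the for-loop over word_indexes[1:] with break / for-else flag
def checkLoopA (last_index : Int) : List Int → Bool
  | [] => true                      -- loop completed: else-branch sets is_continuous = True
  | i :: rest => if i ≠ last_index + 1 then false else checkLoopA i rest

def check_index_continuous (word_indexes : List Int) : Bool :=
  match word_indexes with
  | [] => false                     -- word_indexes[0] raises IndexError; excluded by Pre_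
  | h :: t => checkLoopA h t

-- ===== PORT B =====
def check_index_continuous_alt (word_indexes : List Int) : Bool :=
  match word_indexes with
  | [] => false                     -- word_indexes[0] raises IndexError; excluded by Pre_
  | h :: _ => word_indexes == PySem.List.pyRange h (h + word_indexes.length) 1

-- ===== PRECONDITION & SPEC =====
-- Pre_ excludes only the empty list, on which both A and B raise IndexError (word_indexes[0]).
def Pre_check_index_continuous (word_indexes : List Int) : Prop := word_indexes ≠ []
instance (word_indexes : List Int) : Decidable (Pre_check_index_continuous word_indexes) := by unfold Pre_check_index_continuous; infer_instance
def pvWitness_check_index_continuous : List Int := ([1, 2, 3])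
def Spec_check_index_continuous (word_indexes : List Int) (out : Bool) : Prop := out = check_index_continuous_alt word_indexes
instance (word_indexes : List Int) (out : Bool) : Decidable (Spec_check_index_continuous word_indexes out) := by unfold Spec_check_index_continuous; infer_instance

-- ===== CLAIM (what is proved, stated in full; the proofs are below) =====
def Claim_equal_check_index_continuous : Prop := ∀ (word_indexes : List Int), Dom_check_index_continuous word_indexes → Pre_check_index_continuous word_indexes → Spec_check_index_continuous word_indexes (check_index_continuous word_indexes)

-- ===== LEMMAS AND PROOFS =====
lemma checkLoopA_eq_range (t : List Int) : ∀ (h : Int),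
    checkLoopA h t = ((h :: t) == PySem.List.pyRange h (h + (t.length + 1)) 1) := by
  induction t with
  | nil =>
    intro h
    simp only [List.length_nil]
    rw [PySem.List.pyRange_one_cons (by omega), PySem.List.pyRange_one_eq_nil (by omega)]
    simp [checkLoopA]
  | cons i rest ih =>
    intro h
    rw [PySem.List.pyRange_one_cons (by omega)]
    by_cases hi : i = h + 1
    · subst hi
      have := ih (h + 1)
      simp [checkLoopA]
      rw [this]
      have : h + (rest.length + 1 + 1) = (h + 1) + (rest.length + 1) := by ring
      rw [this]
    · have hne : (i :: rest) ≠ PySem.List.pyRange (h+1) (h + (rest.length + 1 + 1)) 1 := by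
        intro he
        rcases rest with _ | _
        · rw [PySem.List.pyRange_one_cons (by omega)] at he
          exact hi (List.head_eq_of_cons_eq he)
        · rw [PySem.List.pyRange_one_cons (by omega)] at he
          exact hi (List.head_eq_of_cons_eq he)
      simp [checkLoopA, hi]
      intro he
      exact absurd he hne

-- ===== VERDICT (by name: the statement is the Claim_ definition above) =====
theorem check_index_continuous_spec : Claim_equal_check_index_continuous := by
  intro w _ hpre
  unfold Spec_check_index_continuous
  match w with
  | [] => exact absurd rfl hpre
  | h :: t =>
    simp only [check_index_continuous, check_index_continuous_alt, List.length_cons]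
    rw [checkLoopA_eq_range t h]
    norm_num
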